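-- pv_equiv track=rewrite | github.com/CdrBlair/advent_of_code_python | 2016/sixteen_day7.py | checkfortls
-- ===== SOURCE A (Python) =====
-- def checkforabba(part):
--     for i, char in enumerate(part):
--         if i + 3 < len(part):
--             startab = part[i : i + 2]
--             endab = part[i + 2 : i + 4]
--
--             if startab == endab[::-1] and startab != endab:
--                 return True
--     return False
--
-- def checkfortls(ip):
--     outside, hypernets = ip
--     for hypernet in hypernets:
--         if checkforabba(hypernet):
--             return False
--     for outside_part in outside:
--         if checkforabba(outside_part):
--             return True
--
--     return False
-- ===== SOURCE B (Python) =====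
-- def _abba(part):
--     # enumerate candidate patterns from the part's alphabet and search each as a substring
--     chars = set(part)
--     return any(a != b and a + b + b + a in part
--                for a in chars for b in chars)
--
-- def checkfortls(ip):
--     outside, hypernets = ip
--     return not any(_abba(h) for h in hypernets) and any(_abba(o) for o in outside)
-- ===== Notes on version B (the rewrite author's own statement) =====
-- stated objective: alternative
-- what changed: ABBA detection no longer scans 4-character windows: B enumerates the distinct characters of the part and substring-searches each candidate pattern a+b+b+a (a != b) with the 'in' operator; the two early-return loops of checkfortls collapse into one boolean expression over any().
import Mathlib
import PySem

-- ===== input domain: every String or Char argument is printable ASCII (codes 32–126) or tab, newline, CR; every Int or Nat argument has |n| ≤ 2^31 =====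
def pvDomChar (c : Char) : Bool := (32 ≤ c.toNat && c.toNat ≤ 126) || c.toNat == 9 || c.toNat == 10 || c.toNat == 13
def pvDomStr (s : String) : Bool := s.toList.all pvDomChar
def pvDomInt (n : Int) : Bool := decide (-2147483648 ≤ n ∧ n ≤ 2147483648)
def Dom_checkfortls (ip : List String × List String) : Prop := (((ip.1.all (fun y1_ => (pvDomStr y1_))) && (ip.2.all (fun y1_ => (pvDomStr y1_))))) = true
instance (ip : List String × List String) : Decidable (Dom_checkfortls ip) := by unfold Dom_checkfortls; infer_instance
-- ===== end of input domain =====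

-- B replaces A's 4-character-window scan by a different algorithm: it enumerates the
-- distinct characters of the part and substring-searches each candidate pattern
-- a+b+b+a (a ≠ b); checkfortls's two early-return loops become one boolean
-- expression (objective: alternative; not claimed faster).

-- ===== PORT A =====
-- the for-loop of checkforabba: i runs over the character positions, with early return
def checkforabbaGo (s : List Char) (i : Nat) : Nat → Bool
  | 0 => false
  | fuel + 1 =>
    (if i + 3 < s.length then
      let startab := PySem.List.slice s (some (i : Int)) (some ((i : Int) + 2))
      let endab := PySem.List.slice s (some ((i : Int) + 2)) (some ((i : Int) + 4))
      -- endab[::-1]: slice? with step -1 is never none, so getD [] is exact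
      (startab == (PySem.List.slice? endab none none (-1)).getD []) && !(startab == endab)
    else false) || checkforabbaGo s (i + 1) fuel

def checkforabba (part : String) : Bool :=
  checkforabbaGo part.toList 0 part.toList.length

def checkfortls (ip : List String × List String) : Bool :=
  -- first loop: return False on the first hypernet with an ABBA
  if ip.2.any (fun hypernet => checkforabba hypernet) then false
  -- second loop: return True on the first outside part with an ABBA
  else if ip.1.any (fun outside_part => checkforabba outside_part) then true
  else false

-- ===== PORT B =====
-- chars = set(part); any(a != b and a+b+b+a in part for a in chars for b in chars)
def abbaAlt (part : String) : Bool :=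
  let chars : PySem.Set Char := PySem.Set.ofList part.toList
  chars.any (fun a => chars.any (fun b =>
    !(a == b) && PySem.Chars.isIn [a, b, b, a] part.toList))

def checkfortls_alt (ip : List String × List String) : Bool :=
  !(ip.2.any (fun h => abbaAlt h)) && ip.1.any (fun o => abbaAlt o)

-- ===== PRECONDITION & SPEC =====
def Spec_checkfortls (ip : List String × List String) (out : Bool) : Prop := out = checkfortls_alt ip
instance (ip : List String × List String) (out : Bool) : Decidable (Spec_checkfortls ip out) := by unfold Spec_checkfortls; infer_instance

-- ===== CLAIM (what is proved, stated in full; the proofs are below) =====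
def Claim_equal_checkfortls : Prop := ∀ (ip : List String × List String), Dom_checkfortls ip → Spec_checkfortls ip (checkfortls ip)

-- ===== LEMMAS AND PROOFS =====

-- common characterisation: some consecutive window a b c d has a = d, b = c, a ≠ b
def hasABBA : List Char → Bool
  | a :: rest@(b :: c :: d :: _) => (a == d && b == c && !(a == b)) || hasABBA rest
  | _ => false

theorem hasABBA_short (s : List Char) (h : s.length < 4) : hasABBA s = false := by
  rcases s with _ | ⟨a, _ | ⟨b, _ | ⟨c, _ | ⟨d, t⟩⟩⟩⟩ <;>
    first
      | (exfalso; simp at h; omega)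
      | simp [hasABBA]

theorem beq_f (x y : Char) (h : ¬ x = y) : (x == y) = false := beq_eq_false_iff_ne.mpr h

theorem abba_cond (a b c d : Char) :
    (([a, b] == [d, c]) && !([a, b] == [c, d])) = (a == d && (b == c && !(a == b))) := by
  by_cases e1 : a = d
  · by_cases e2 : b = c
    · subst e1; subst e2
      by_cases e3 : a = b
      · subst e3; simp
      · simp [beq_f _ _ e3, beq_f _ _ (fun h => e3 h.symm)]
    · simp [beq_f _ _ e2]
  · simp [beq_f _ _ e1]

-- A's window loop computes hasABBA
theorem checkforabbaGo_eq (s : List Char) (fuel i : Nat) (hf : fuel + i = s.length) :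
    checkforabbaGo s i fuel = hasABBA (s.drop i) := by
  induction fuel generalizing i with
  | zero =>
    have : s.drop i = [] := by
      apply List.drop_eq_nil_of_le; omega
    simp [checkforabbaGo, this, hasABBA]
  | succ fuel ih =>
    have hrec := ih (i + 1) (by omega)
    simp only [checkforabbaGo]
    by_cases hlen : i + 3 < s.length
    · have hdl : 4 ≤ (s.drop i).length := by simp; omega
      rcases hd : s.drop i with _ | ⟨a, _ | ⟨b, _ | ⟨c, _ | ⟨d, u⟩⟩⟩⟩ <;>
        simp [hd] at hdl <;> try omega
      have h1 : PySem.List.slice s (some (i : Int)) (some ((i : Int) + 2)) = [a, b] := by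
        rw [show ((i : Int) + 2) = ((i + 2 : Nat) : Int) by push_cast; ring,
          PySem.List.slice_natCast, hd]
        simp [show i + 2 - i = 2 by omega]
      have hdd2 : List.drop (i + 2) s = List.drop 2 (List.drop i s) := by
        rw [List.drop_drop, Nat.add_comm]
      have h2 : PySem.List.slice s (some ((i : Int) + 2)) (some ((i : Int) + 4)) = [c, d] := by
        rw [show ((i : Int) + 2) = ((i + 2 : Nat) : Int) by push_cast; ring,
          show ((i : Int) + 4) = ((i + 4 : Nat) : Int) by push_cast; ring,
          PySem.List.slice_natCast, hdd2, hd]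
        simp [show i + 4 - (i + 2) = 2 by omega]
      have h3 : s.drop (i + 1) = b :: c :: d :: u := by
        rw [show List.drop (i + 1) s = List.drop 1 (List.drop i s) from by
          rw [List.drop_drop, Nat.add_comm], hd]
        rfl
      have hrev : ([c, d] : List Char).reverse = [d, c] := by simp
      rw [if_pos hlen]
      simp only [h1, h2, PySem.List.slice?_none_none_neg_one, Option.getD_some,
        hrev, abba_cond, hrec, h3, hasABBA]
      simp [Bool.and_assoc]
    · rw [if_neg hlen]
      have hshort : (s.drop i).length < 4 := by simp; omega
      have hshort' : (s.drop (i + 1)).length < 4 := by simp; omega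
      simp [hrec, hasABBA_short _ hshort, hasABBA_short _ hshort']

-- hasABBA is exactly: some pattern [a,b,b,a] with a ≠ b occurs as an infix
theorem hasABBA_iff (s : List Char) :
    hasABBA s = true ↔ ∃ a b : Char, a ≠ b ∧ [a, b, b, a] <:+: s := by
  induction s with
  | nil =>
    constructor
    · intro h; simp [hasABBA] at h
    · rintro ⟨a, b, _, hinf⟩
      have := hinf.length_le; simp at this
  | cons x t ih =>
    rcases t with _ | ⟨y, _ | ⟨z, _ | ⟨w, u⟩⟩⟩
    · constructor
      · intro h; simp [hasABBA] at h
      · rintro ⟨a, b, _, hinf⟩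
        have := hinf.length_le; simp at this
    · constructor
      · intro h; simp [hasABBA] at h
      · rintro ⟨a, b, _, hinf⟩
        have := hinf.length_le; simp at this
    · constructor
      · intro h; simp [hasABBA] at h
      · rintro ⟨a, b, _, hinf⟩
        have := hinf.length_le; simp at this
    · rw [show hasABBA (x :: y :: z :: w :: u)
          = ((x == w && y == z && !(x == y)) || hasABBA (y :: z :: w :: u)) by
            simp only [hasABBA]]
      constructor
      · intro h
        rcases Bool.or_eq_true_iff.mp h with h1 | h2
        · have hxw : x = w := by
            have := (Bool.and_eq_true_iff.mp (Bool.and_eq_true_iff.mp h1).1).1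
            exact beq_iff_eq.mp this
          have hyz : y = z := by
            have := (Bool.and_eq_true_iff.mp (Bool.and_eq_true_iff.mp h1).1).2
            exact beq_iff_eq.mp this
          have hxy : x ≠ y := by
            have := (Bool.and_eq_true_iff.mp h1).2
            simpa using this
          refine ⟨x, y, hxy, ?_⟩
          subst hxw; subst hyz
          exact ⟨[], u, rfl⟩
        · obtain ⟨a, b, hab, hinf⟩ := ih.mp h2
          exact ⟨a, b, hab, List.infix_cons hinf⟩
      · rintro ⟨a, b, hab, hinf⟩
        rcases (List.infix_cons_iff).mp hinf with hpre | htail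
        · -- [a,b,b,a] is a prefix of x :: y :: z :: w :: u
          obtain ⟨r, hr⟩ := hpre
          have hx : x = a ∧ y = b ∧ z = b ∧ w = a := by
            injection hr with h1 hr; injection hr with h2 hr
            injection hr with h3 hr; injection hr with h4 _
            exact ⟨h1.symm, h2.symm, h3.symm, h4.symm⟩
          obtain ⟨e1, e2, e3, e4⟩ := hx
          apply Bool.or_eq_true_iff.mpr; left
          subst e1; subst e2; subst e3; subst e4
          simp [beq_f _ _ hab]
        · apply Bool.or_eq_true_iff.mpr; right
          exact ih.mpr ⟨a, b, hab, htail⟩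

-- B's alphabet-pair substring search computes hasABBA too
theorem abbaAlt_eq_hasABBA (p : String) : abbaAlt p = hasABBA p.toList := by
  rcases h : hasABBA p.toList with _ | _
  · -- no ABBA: every candidate search fails
    rw [abbaAlt]
    apply List.any_eq_false.mpr
    intro a _
    simp only [Bool.not_eq_true]
    apply List.any_eq_false.mpr
    intro b _
    simp only [Bool.not_eq_true]
    by_cases hab : a = b
    · subst hab; simp
    · have hni : ¬ [a, b, b, a] <:+: p.toList := by
        intro hinf
        have := (hasABBA_iff p.toList).mpr ⟨a, b, hab, hinf⟩
        rw [h] at this; exact absurd this (by simp)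
      rw [(PySem.Chars.isIn_eq_false_iff _ _).mpr hni]
      simp
  · obtain ⟨a, b, hab, hinf⟩ := (hasABBA_iff p.toList).mp h
    have ha : a ∈ p.toList := hinf.subset (by simp)
    have hb : b ∈ p.toList := hinf.subset (by simp)
    rw [abbaAlt]
    apply List.any_eq_true.mpr
    refine ⟨a, (PySem.Set.mem_ofList _ _).mpr ha, ?_⟩
    apply List.any_eq_true.mpr
    refine ⟨b, (PySem.Set.mem_ofList _ _).mpr hb, ?_⟩
    simp [beq_f _ _ hab, (PySem.Chars.isIn_iff_infix _ _).mpr hinf]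

theorem abba_eq (p : String) : checkforabba p = abbaAlt p := by
  rw [checkforabba, checkforabbaGo_eq p.toList p.toList.length 0 (by omega),
    List.drop_zero, abbaAlt_eq_hasABBA]

-- ===== VERDICT (by name: the statement is the Claim_ definition above) =====
theorem checkfortls_spec : Claim_equal_checkfortls := by
  intro ip _
  unfold Spec_checkfortls checkfortls checkfortls_alt
  simp only [abba_eq]
  cases h2 : ip.2.any (fun h => abbaAlt h) <;>
    cases h1 : ip.1.any (fun o => abbaAlt o) <;> simp
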